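-- pv_equiv track=rewrite | github.com/jenul-ferdinand/fit2004 | wk7/prob1.py | optimal_sale_houses
-- ===== SOURCE A (Python) =====
-- def optimal_sale_houses(houses: list[int]) -> list:
--     """
--     Find the optimal set of houses after selling to them for max profit.
--
--     Time complexity: O(n) where n is the no. of houses
--     Space complexity: O(n) auxillary space
--     """
--     N = len(houses)
--     if N == 0:
--         return 0
--     if N == 1:
--         return houses[0]
--
--     # Create memo array
--     memo = [None] * N
--
--     # Base cases
--     memo[0] = houses[0]
--     memo[1] = max(houses[0], houses[1])
--
--     # Track decisions
--     decisions = [False] * N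
--     decisions[0] = True
--     decisions[1] = houses[1] > houses[0] # Did we sell house 1 or 0
--
--     # Optimal substructure
--     for i in range(2, N):
--         sell_profit = houses[i] + memo[i - 2]
--         skip_profit = memo[i - 1]
--
--         if sell_profit >= skip_profit:
--             memo[i] = sell_profit
--             decisions[i] = True # We sell this house
--
--         if sell_profit < skip_profit:
--             memo[i] = skip_profit
--             decisions[i] = False # We skip this house
--
--     # Backtrack to find which houses were sold
--     houses_sold = []
--     i = N - 1
--     while i >= 0:
--         if decisions[i]:
--             houses_sold.append(i)
--             i -= 2 # Skip the adjacent house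
--         else:
--             i -= 1 # Move to the previous house
--
--     houses_sold.reverse()
--
--     return houses_sold
-- ===== SOURCE B (Python) =====
-- def optimal_sale_houses(houses: list[int]) -> list:
--     """
--     Max-profit non-adjacent house selection: forward DP carrying the chosen
--     selections directly as persistent (index, parent) chains, so there is no
--     memo/decisions array and no backtracking pass; extending a selection is O(1).
--     """
--     N = len(houses)
--     if N == 0:
--         return []
--     if N == 1:
--         return [0]
--     # State for prefixes ending at index i-2 / i-1: (selection chain, profit).
--     prev2_sel, prev2_val = (0, None), houses[0]
--     prev1_sel = (1, None) if houses[1] > houses[0] else (0, None)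
--     prev1_val = max(houses[0], houses[1])
--     for i in range(2, N):
--         sell = houses[i] + prev2_val
--         if sell >= prev1_val:
--             cur_sel, cur_val = (i, prev2_sel), sell
--         else:
--             cur_sel, cur_val = prev1_sel, prev1_val
--         prev2_sel, prev2_val = prev1_sel, prev1_val
--         prev1_sel, prev1_val = cur_sel, cur_val
--     out = []
--     node = prev1_sel
--     while node is not None:
--         out.append(node[0])
--         node = node[1]
--     out.reverse()
--     return out
-- ===== Notes on version B (the rewrite author's own statement) =====
-- stated objective: alternative
-- what changed: Replaces A's memo array + decisions array + backward backtracking pass with a single forward DP that carries the two candidate selections directly as persistent (index, parent) chains in O(1) rolling state, so no decisions array and no backtrack pass exist.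
-- outside the precondition, e.g. on optimal_sale_houses([]): A returns 0, B returns []; on optimal_sale_houses([5]): A returns 5, B returns [0]; on optimal_sale_houses([0]): A returns 0, B returns [0]
import Mathlib
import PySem

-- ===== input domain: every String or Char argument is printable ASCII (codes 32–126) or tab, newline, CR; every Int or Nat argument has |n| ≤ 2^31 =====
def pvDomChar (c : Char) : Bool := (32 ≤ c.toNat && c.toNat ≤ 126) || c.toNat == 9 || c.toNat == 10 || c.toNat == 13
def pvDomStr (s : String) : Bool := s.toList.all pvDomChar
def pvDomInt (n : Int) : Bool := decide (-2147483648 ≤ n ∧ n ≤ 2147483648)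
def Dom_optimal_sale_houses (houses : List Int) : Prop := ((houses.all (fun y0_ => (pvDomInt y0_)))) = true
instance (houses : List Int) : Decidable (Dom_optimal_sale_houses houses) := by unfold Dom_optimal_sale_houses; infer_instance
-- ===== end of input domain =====

-- B replaces A's memo+decisions arrays and backtracking pass by one forward DP that
-- carries the two candidate index lists directly (objective: alternative decomposition).

-- ===== PORT A =====
-- The backtracking while-loop of A (i decreases by 1 or 2 until i < 0; appends sold indices).
def pvBacktrack (d : List Bool) (i : Int) (acc : List Int) : List Int :=
  if i < 0 then acc
  else if d.getD i.toNat false then pvBacktrack d (i - 2) (acc ++ [i])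
  else pvBacktrack d (i - 1) acc
termination_by (i + 1).toNat
decreasing_by all_goals omega

-- One iteration of A's forward loop; Python's two complementary ifs are one if/else.
-- houses[i] / memo[i-2] / memo[i-1]: indices always in range, ported with pyGetD.
def pvStepA (houses : List Int) (st : List Int × List Bool) (i : Int) : List Int × List Bool :=
  let sell := PySem.List.pyGetD houses i 0 + PySem.List.pyGetD st.1 (i - 2) 0
  let skip := PySem.List.pyGetD st.1 (i - 1) 0
  if sell ≥ skip then (st.1 ++ [sell], st.2 ++ [true])
  else (st.1 ++ [skip], st.2 ++ [false])

def optimal_sale_houses (houses : List Int) : List Int :=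
  let N : Int := houses.length
  if N = 0 then []        -- Python A returns the int 0 here (not a list): excluded by Pre_
  else if N = 1 then []   -- Python A returns the int houses[0] here (not a list): excluded by Pre_
  else
    let h0 := PySem.List.pyGetD houses 0 0
    let h1 := PySem.List.pyGetD houses 1 0
    let st := (PySem.List.pyRange 2 N 1).foldl (pvStepA houses) ([h0, max h0 h1], [true, decide (h1 > h0)])
    (pvBacktrack st.2 (N - 1) []).reverse

-- ===== PORT B =====
-- A persistent selection chain (i, parent) / None is a cons list i :: parent / [].
-- One iteration of B's loop; state = ((chain, val) for prefix i-2, (chain, val) for prefix i-1).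
def pvStepB (houses : List Int) (st : (List Int × Int) × (List Int × Int)) (i : Int) :
    (List Int × Int) × (List Int × Int) :=
  let sell := PySem.List.pyGetD houses i 0 + st.1.2
  if sell ≥ st.2.2 then (st.2, (i :: st.1.1, sell))
  else (st.2, st.2)

def optimal_sale_houses_alt (houses : List Int) : List Int :=
  let N : Int := houses.length
  if N = 0 then []
  else if N = 1 then [0]
  else
    let h0 := PySem.List.pyGetD houses 0 0
    let h1 := PySem.List.pyGetD houses 1 0
    let st := (PySem.List.pyRange 2 N 1).foldl (pvStepB houses)
      (([0], h0), ((if h1 > h0 then [1] else [0]), max h0 h1))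
    -- B's unwind loop reads the chain front-to-back (identity on this encoding), then reverses
    st.2.1.reverse

-- ===== PRECONDITION & SPEC =====
-- Pre_ excludes lists of fewer than two houses, on which A returns a bare int (0 resp.
-- houses[0]) instead of a list of indices — not a value of the declared return type.
def Pre_optimal_sale_houses (houses : List Int) : Prop := 2 ≤ houses.length
instance (houses : List Int) : Decidable (Pre_optimal_sale_houses houses) := by
  unfold Pre_optimal_sale_houses; infer_instance

def pvWitness_optimal_sale_houses : List Int := [3, 1, 4]

def Spec_optimal_sale_houses (houses : List Int) (out : List Int) : Prop := out = optimal_sale_houses_alt houses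
instance (houses : List Int) (out : List Int) : Decidable (Spec_optimal_sale_houses houses out) := by unfold Spec_optimal_sale_houses; infer_instance

-- ===== CLAIM (what is proved, stated in full; the proofs are below) =====
def Claim_equal_optimal_sale_houses : Prop := ∀ (houses : List Int), Dom_optimal_sale_houses houses → Pre_optimal_sale_houses houses → Spec_optimal_sale_houses houses (optimal_sale_houses houses)

-- ===== LEMMAS AND PROOFS =====

-- getD at the freshly appended position / below it
theorem pv_getD_concat {a : Type} (l : List a) (x d : a) (n : Nat) (h : n = l.length) :
    (l ++ [x]).getD n d = x := by subst h; simp [List.getD]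

-- The selection A's backtrack from index n-1 produces, read forward:
-- pvPick d n = indices sold among 0..n-1 (Python's pick at index n-1).
def pvPick (d : List Bool) : Nat → List Int
  | 0 => []
  | 1 => if d.getD 0 false then [0] else []
  | (n+2) => if d.getD (n+1) false then pvPick d n ++ [((n+1 : Nat) : Int)] else pvPick d (n+1)

theorem pvPick_append (d : List Bool) (b : Bool) :
    ∀ (n : Nat), n ≤ d.length → pvPick (d ++ [b]) n = pvPick d n
  | 0, _ => rfl
  | 1, h => by
      rw [pvPick, pvPick, List.getD_append d [b] false 0 (by omega)]
  | (n+2), h => by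
      rw [pvPick, pvPick, List.getD_append d [b] false (n+1) (by omega),
          pvPick_append d b n (by omega), pvPick_append d b (n+1) (by omega)]

theorem pvBacktrack_pick (d : List Bool) :
    ∀ (n : Nat) (acc : List Int), pvBacktrack d ((n : Int) - 1) acc = acc ++ (pvPick d n).reverse
  | 0, acc => by rw [pvBacktrack]; simp [pvPick]
  | 1, acc => by
      have e : ((1 : Nat) : Int) - 1 = 0 := by norm_num
      rw [e, pvBacktrack, if_neg (by norm_num)]
      have e0 : (0 : Int).toNat = 0 := rfl
      rw [e0]
      by_cases hd : d.getD 0 false = true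
      · rw [if_pos hd, pvBacktrack, if_pos (by norm_num), pvPick, if_pos hd]
        simp
      · rw [if_neg hd, pvBacktrack, if_pos (by norm_num), pvPick, if_neg hd]
        simp
  | (n+2), acc => by
      rw [pvBacktrack, if_neg (by push_cast; omega)]
      have ht : (((n+2 : Nat) : Int) - 1).toNat = n + 1 := by omega
      rw [ht]
      by_cases hd : d.getD (n+1) false = true
      · rw [if_pos hd]
        have ea : ((n+2 : Nat) : Int) - 1 - 2 = ((n : Nat) : Int) - 1 := by push_cast; ring
        have eb : ((n+2 : Nat) : Int) - 1 = ((n+1 : Nat) : Int) := by push_cast; ring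
        rw [ea, pvBacktrack_pick d n, eb, pvPick, if_pos hd]
        simp
      · rw [if_neg hd]
        have ea : ((n+2 : Nat) : Int) - 1 - 1 = ((n+1 : Nat) : Int) - 1 := by push_cast; ring
        rw [ea, pvBacktrack_pick d (n+1)]
        simp only [pvPick]
        rw [if_neg hd]

-- The main loop invariant: after processing range(2, k+2), A's (memo, decisions)
-- and B's ((s2,v2),(s1,v1)) satisfy: lengths k+2, s2/s1 are the pvPick selections
-- up to indices k and k+1, v2/v1 the corresponding memo values.
theorem pvLoopInv (houses : List Int) (k : Nat) :
    ∀ (stA : List Int × List Bool) (stB : (List Int × Int) × (List Int × Int)),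
      stA = (PySem.List.pyRange 2 (2 + (k : Int)) 1).foldl (pvStepA houses)
        ([PySem.List.pyGetD houses 0 0,
          max (PySem.List.pyGetD houses 0 0) (PySem.List.pyGetD houses 1 0)],
         [true, decide (PySem.List.pyGetD houses 1 0 > PySem.List.pyGetD houses 0 0)]) →
      stB = (PySem.List.pyRange 2 (2 + (k : Int)) 1).foldl (pvStepB houses)
        (([0], PySem.List.pyGetD houses 0 0),
         ((if PySem.List.pyGetD houses 1 0 > PySem.List.pyGetD houses 0 0 then [1] else [0]),
          max (PySem.List.pyGetD houses 0 0) (PySem.List.pyGetD houses 1 0))) →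
      stA.1.length = k + 2 ∧ stA.2.length = k + 2 ∧
      stB.1.1 = (pvPick stA.2 (k + 1)).reverse ∧ stB.1.2 = stA.1.getD k 0 ∧
      stB.2.1 = (pvPick stA.2 (k + 2)).reverse ∧ stB.2.2 = stA.1.getD (k + 1) 0 := by
  induction k with
  | zero =>
      intro stA stB hA hB
      rw [PySem.List.pyRange_one_eq_nil (by norm_num)] at hA hB
      subst hA; subst hB
      refine ⟨rfl, rfl, by simp [pvPick], rfl, ?_, rfl⟩
      by_cases h : PySem.List.pyGetD houses 1 0 > PySem.List.pyGetD houses 0 0 <;>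
        simp [pvPick, h]
  | succ k ih =>
      intro stA stB hA hB
      have hsplit : PySem.List.pyRange 2 (2 + ((k+1 : Nat) : Int)) 1
          = PySem.List.pyRange 2 (2 + (k : Int)) 1 ++ [2 + (k : Int)] := by
        have : (2 : Int) + ((k+1 : Nat) : Int) = (2 + (k : Int)) + 1 := by push_cast; ring
        rw [this, PySem.List.pyRange_one_succ_right (by omega)]
      rw [hsplit, List.foldl_append] at hA hB
      obtain ⟨hl1, hl2, hs2, hv2, hs1, hv1⟩ := ih _ _ rfl rfl
      set mA := ((PySem.List.pyRange 2 (2 + (k : Int)) 1).foldl (pvStepA houses)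
        ([PySem.List.pyGetD houses 0 0,
          max (PySem.List.pyGetD houses 0 0) (PySem.List.pyGetD houses 1 0)],
         [true, decide (PySem.List.pyGetD houses 1 0 > PySem.List.pyGetD houses 0 0)])) with hmA
      set mB := ((PySem.List.pyRange 2 (2 + (k : Int)) 1).foldl (pvStepB houses)
        (([0], PySem.List.pyGetD houses 0 0),
         ((if PySem.List.pyGetD houses 1 0 > PySem.List.pyGetD houses 0 0 then [1] else [0]),
          max (PySem.List.pyGetD houses 0 0) (PySem.List.pyGetD houses 1 0)))) with hmB
      simp only [List.foldl_cons, List.foldl_nil] at hA hB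
      have e2 : (2 + (k : Int)) - 2 = ((k : Nat) : Int) := by omega
      have e1 : (2 + (k : Int)) - 1 = ((k + 1 : Nat) : Int) := by push_cast; ring
      rw [pvStepA] at hA
      rw [pvStepB] at hB
      simp only [e2, e1, PySem.List.pyGetD_natCast] at hA hB
      rw [← hv2, ← hv1] at hA
      by_cases hcond :
          PySem.List.pyGetD houses (2 + (k : Int)) 0 + mB.1.2 ≥ mB.2.2
      · rw [if_pos hcond] at hA hB
        subst hA; subst hB
        have hgd : (mA.2 ++ [true]).getD (k+1+1) false = true :=
          pv_getD_concat _ _ _ _ (by omega)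
        refine ⟨by simp [hl1], by simp [hl2], ?_, ?_, ?_, ?_⟩
        · show mB.2.1 = (pvPick (mA.2 ++ [true]) (k+1+1)).reverse
          rw [pvPick_append _ _ _ (by omega)]; exact hs1
        · show mB.2.2 = (mA.1 ++ [_]).getD (k+1) 0
          rw [List.getD_append mA.1 _ 0 (k+1) (by omega)]; exact hv1
        · show (2 + (k : Int)) :: mB.1.1 = (pvPick (mA.2 ++ [true]) (k+1+2)).reverse
          rw [pvPick, if_pos hgd, pvPick_append _ _ _ (by omega), hs2]
          have : ((k+1+1 : Nat) : Int) = 2 + (k : Int) := by push_cast; ring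
          simp [this]
        · show PySem.List.pyGetD houses (2 + (k : Int)) 0 + mB.1.2
              = (mA.1 ++ [PySem.List.pyGetD houses (2 + (k : Int)) 0 + mB.1.2]).getD (k+1+1) 0
          rw [pv_getD_concat _ _ _ _ (by omega)]
      · rw [if_neg hcond] at hA hB
        subst hA; subst hB
        have hgd : (mA.2 ++ [false]).getD (k+1+1) false = false :=
          pv_getD_concat _ _ _ _ (by omega)
        refine ⟨by simp [hl1], by simp [hl2], ?_, ?_, ?_, ?_⟩
        · show mB.2.1 = (pvPick (mA.2 ++ [false]) (k+1+1)).reverse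
          rw [pvPick_append _ _ _ (by omega)]; exact hs1
        · show mB.2.2 = (mA.1 ++ [_]).getD (k+1) 0
          rw [List.getD_append mA.1 _ 0 (k+1) (by omega)]; exact hv1
        · show mB.2.1 = (pvPick (mA.2 ++ [false]) (k+1+2)).reverse
          rw [pvPick, if_neg (by rw [hgd]; simp), pvPick_append _ _ _ (by omega)]
          exact hs1
        · show mB.2.2 = (mA.1 ++ [mB.2.2]).getD (k+1+1) 0
          rw [pv_getD_concat _ _ _ _ (by omega)]

-- ===== VERDICT (by name: the statement is the Claim_ definition above) =====
theorem optimal_sale_houses_spec : Claim_equal_optimal_sale_houses := by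
  intro houses _ hpre
  unfold Spec_optimal_sale_houses
  obtain ⟨k, hk⟩ : ∃ k, houses.length = k + 2 := ⟨houses.length - 2, by
    have h2 := hpre; unfold Pre_optimal_sale_houses at h2; omega⟩
  have hN : (houses.length : Int) = 2 + (k : Int) := by rw [hk]; push_cast; ring
  obtain ⟨hl1, hl2, _, _, hs1, _⟩ := pvLoopInv houses k _ _ rfl rfl
  simp only [optimal_sale_houses, optimal_sale_houses_alt, hN,
    if_neg (show ¬(2 + (k : Int) = 0) by omega),
    if_neg (show ¬(2 + (k : Int) = 1) by omega)]
  rw [hs1]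
  have hbt := pvBacktrack_pick
    (((PySem.List.pyRange 2 (2 + (k : Int)) 1).foldl (pvStepA houses)
        ([PySem.List.pyGetD houses 0 0,
          max (PySem.List.pyGetD houses 0 0) (PySem.List.pyGetD houses 1 0)],
         [true, decide (PySem.List.pyGetD houses 1 0 > PySem.List.pyGetD houses 0 0)])).2)
    (k + 2) []
  have hc : ((k + 2 : Nat) : Int) - 1 = (2 + (k : Int)) - 1 := by push_cast; ring
  rw [hc] at hbt
  rw [hbt]
  simp
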